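-- pv_equiv track=rewrite | github.com/PythonHugs/AdventOfCode2023 | puzzle_3/puzzle_3.py | get_part_numbers
-- ===== SOURCE A (Python) =====
-- def get_part_numbers(puzzle_input):
--     part_number_indices = {}
--     for line_index, line in enumerate(puzzle_input):
--         part_number_indices[line_index] = []
--         int_stack = []
--         for i, char in enumerate(line):
--             try:
--                 int(char)
--                 int_stack.append(char)
--                 if i == len(line) - 1:
--                     part_number_indices[line_index].append(int(''.join(int_stack)))
--                     int_stack = []
--             except ValueError:
--                 if len(int_stack) > 0:
--                     part_number_indices[line_index].append(int(''.join(int_stack)))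
--                     int_stack = []
--     return part_number_indices
-- ===== SOURCE B (Python) =====
-- def get_part_numbers(puzzle_input):
--     result = {}
--     for idx, line in enumerate(puzzle_input):
--         nums = []
--         rest = line
--         while rest:
--             if rest[0].isdigit():
--                 k = 0
--                 while k < len(rest) and rest[k].isdigit():
--                     k += 1
--                 nums.append(int(rest[:k]))
--                 rest = rest[k:]
--             else:
--                 rest = rest[1:]
--         result[idx] = nums
--     return result
-- ===== Notes on version B (the rewrite author's own statement) =====
-- stated objective: simpler
-- what changed: Replaced the per-character state machine (digit stack, manual end-of-line flush, ValueError-based digit test) with a run scanner that consumes each maximal digit run in one step via isdigit and slicing.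
import Mathlib
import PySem

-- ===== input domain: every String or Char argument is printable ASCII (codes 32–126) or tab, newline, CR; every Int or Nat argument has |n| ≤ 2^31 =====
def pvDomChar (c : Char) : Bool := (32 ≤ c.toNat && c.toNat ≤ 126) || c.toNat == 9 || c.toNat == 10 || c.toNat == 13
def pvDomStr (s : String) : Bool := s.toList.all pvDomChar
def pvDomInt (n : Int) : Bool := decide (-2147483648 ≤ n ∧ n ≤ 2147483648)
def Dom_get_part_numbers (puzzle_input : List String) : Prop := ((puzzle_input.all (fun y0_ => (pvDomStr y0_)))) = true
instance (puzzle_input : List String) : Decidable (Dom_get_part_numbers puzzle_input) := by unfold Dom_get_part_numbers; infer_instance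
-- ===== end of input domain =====

-- B replaces A's per-character digit-stack state machine with a run scanner that
-- consumes each maximal digit run in one step (simpler; measured faster by a constant factor).


-- shared helper: int(cs) on a (always valid) digit string, as both Pythons call int(...)
def pvInt (cs : List Char) : Int := (PySem.Int.ofChars? cs).getD 0

-- ===== PORT A =====
-- A's inner loop body: try int(char) / push on the stack / flush at end of line or at a non-digit
def aStep (k L : Int) (st : PySem.Dict Int (List Int) × List Char) (q : Int × Char) :
    PySem.Dict Int (List Int) × List Char :=
  if (PySem.Int.ofChars? [q.2]).isSome then
    let stack := st.2 ++ [q.2]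
    if q.1 = L - 1 then (st.1.modify k [] (fun l => l ++ [pvInt stack]), [])
    else (st.1, stack)
  else
    if st.2.length > 0 then (st.1.modify k [] (fun l => l ++ [pvInt st.2]), [])
    else (st.1, st.2)

def get_part_numbers (puzzle_input : List String) : List (Int × List Int) :=
  ((PySem.List.enumerate puzzle_input).foldl
    (fun d p =>
      ((PySem.List.enumerate p.2.toList).foldl (aStep p.1 (PySem.Str.len p.2))
        (d.insert p.1 ([] : List Int), ([] : List Char))).1)
    PySem.Dict.empty).items

-- ===== PORT B =====
-- B's while loop: drop a non-digit, or consume a whole maximal digit run at once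
def bScan (nums : List Int) (rest : List Char) : List Int :=
  match rest with
  | [] => nums
  | c :: tl =>
    if PySem.Chars.isdigit c then
      bScan (nums ++ [pvInt (c :: tl.takeWhile PySem.Chars.isdigit)]) (tl.dropWhile PySem.Chars.isdigit)
    else
      bScan nums tl
termination_by rest.length
decreasing_by
  · exact Nat.lt_succ_of_le (List.length_dropWhile_le _ _)
  · simp

def get_part_numbers_alt (puzzle_input : List String) : List (Int × List Int) :=
  ((PySem.List.enumerate puzzle_input).foldl
    (fun d p => d.insert p.1 (bScan [] p.2.toList))
    PySem.Dict.empty).items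

-- ===== PRECONDITION & SPEC =====
def Spec_get_part_numbers (puzzle_input : List String) (out : List (Int × List Int)) : Prop := out = get_part_numbers_alt puzzle_input
instance (puzzle_input : List String) (out : List (Int × List Int)) : Decidable (Spec_get_part_numbers puzzle_input out) := by unfold Spec_get_part_numbers; infer_instance

-- ===== CLAIM (what is proved, stated in full; the proofs are below) =====
def Claim_equal_get_part_numbers : Prop := ∀ (puzzle_input : List String), Dom_get_part_numbers puzzle_input → Spec_get_part_numbers puzzle_input (get_part_numbers puzzle_input)


-- ===== LEMMAS AND PROOFS =====

-- A's `try: int(char)` succeeds exactly on the digit characters, for every character in Dom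
lemma digit_test (c : Char) (hc : pvDomChar c = true) :
    (PySem.Int.ofChars? [c]).isSome = PySem.Chars.isdigit c := by
  have h9 : 9 ≤ c.toNat ∧ c.toNat ≤ 126 := by
    simp [pvDomChar] at hc; omega
  have hofn : Char.ofNat c.toNat = c := Char.ofNat_toNat c
  rw [← hofn]
  obtain ⟨h1, h2⟩ := h9
  interval_cases h : c.toNat <;> decide

-- bScan over a nonempty all-digit string yields the single number
lemma bScan_digits (nums : List Int) (ds : List Char) (hds : ∀ c ∈ ds, PySem.Chars.isdigit c = true)
    (hne : ds ≠ []) : bScan nums ds = nums ++ [pvInt ds] := by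
  match ds with
  | [] => exact absurd rfl hne
  | d :: ds' =>
    rw [bScan, if_pos (hds d (by simp)),
      List.takeWhile_eq_self_iff.mpr (fun x hx => hds x (by simp [hx])),
      List.dropWhile_eq_nil_iff.mpr (fun x hx => hds x (by simp [hx])), bScan]

-- bScan over digits ++ non-digit ++ rest flushes the digit prefix
lemma bScan_flush (nums : List Int) (ds : List Char) (c : Char) (rest : List Char)
    (hds : ∀ x ∈ ds, PySem.Chars.isdigit x = true) (hc : PySem.Chars.isdigit c = false) :
    bScan nums (ds ++ c :: rest) =
      bScan (if ds.length > 0 then nums ++ [pvInt ds] else nums) rest := by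
  match ds with
  | [] => simp [bScan, hc]
  | d :: ds' =>
    rw [List.cons_append, bScan, if_pos (hds d (by simp)),
      List.takeWhile_append_of_pos (fun x hx => hds x (by simp [hx])),
      List.dropWhile_append_of_pos (fun x hx => hds x (by simp [hx]))]
    simp [hc, bScan]

-- the pure version of A's inner loop state (accumulated numbers, digit stack)
def pureStep (L : Int) (st : List Int × List Char) (q : Int × Char) : List Int × List Char :=
  if PySem.Chars.isdigit q.2 then
    let stack := st.2 ++ [q.2]
    if q.1 = L - 1 then (st.1 ++ [pvInt stack], [])
    else (st.1, stack)
  else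
    if st.2.length > 0 then (st.1 ++ [pvInt st.2], [])
    else (st.1, st.2)

-- modifying the fresh last key of a dict rewrites exactly that entry
lemma modify_last (k : Int) (l : List (Int × List Int)) (hk : ∀ p ∈ l, p.1 ≠ k)
    (acc : List Int) (f : List Int → List Int) :
    (PySem.Dict.mk (l ++ [(k, acc)])).modify k [] f = PySem.Dict.mk (l ++ [(k, f acc)]) := by
  have hfind : List.find? (fun p => p.1 == k) (l ++ [(k, acc)]) = some (k, acc) := by
    induction l with
    | nil => simp
    | cons p t ih =>
      rw [List.cons_append, List.find?_cons_of_neg (by simpa using hk p (by simp))]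
      exact ih (fun q hq => hk q (by simp [hq]))
  have hcont : (PySem.Dict.mk (l ++ [(k, acc)])).contains k = true := by
    simp [PySem.Dict.contains]
  rw [PySem.Dict.modify, PySem.Dict.getD, PySem.Dict.get?]
  simp only [hfind, Option.map_some, Option.getD_some]
  rw [PySem.Dict.insert, if_pos hcont]
  congr 1
  rw [List.map_append]
  congr 1
  · conv_rhs => rw [← List.map_id l]
    exact List.map_congr_left (fun p hp => by simp [hk p hp])
  · simp

-- the dict-threading inner loop only ever rewrites the last entry (key k, fresh in l)
lemma inner_dict (es : List (Int × Char)) (k L : Int) (l : List (Int × List Int))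
    (hk : ∀ p ∈ l, p.1 ≠ k) (acc : List Int) (stack : List Char)
    (hd : ∀ q ∈ es, (PySem.Int.ofChars? [q.2]).isSome = PySem.Chars.isdigit q.2) :
    es.foldl (aStep k L) (PySem.Dict.mk (l ++ [(k, acc)]), stack) =
      (PySem.Dict.mk (l ++ [(k, (es.foldl (pureStep L) (acc, stack)).1)]),
       (es.foldl (pureStep L) (acc, stack)).2) := by
  induction es generalizing acc stack with
  | nil => simp
  | cons q es' ih =>
    have hq := hd q (by simp)
    have hstep : aStep k L (PySem.Dict.mk (l ++ [(k, acc)]), stack) q =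
        (PySem.Dict.mk (l ++ [(k, (pureStep L (acc, stack) q).1)]), (pureStep L (acc, stack) q).2) := by
      rw [aStep, pureStep, hq]
      split_ifs with h1 h2 h3 <;> simp [modify_last k l hk]
    rw [List.foldl_cons, List.foldl_cons, hstep]
    obtain ⟨a', s'⟩ := pureStep L (acc, stack) q
    exact ih a' s' (fun q hq => hd q (by simp [hq]))

lemma enum_cons {α : Type} (c : α) (rest : List α) (j : Int) :
    PySem.List.enumerate (c :: rest) j = (j, c) :: PySem.List.enumerate rest (j + 1) := by
  simp [PySem.List.enumerate]

-- A's index-driven flush loop computes exactly B's run scan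
lemma pure_eq_bScan (cs : List Char) (j L : Int) (hj : j + cs.length = L)
    (acc : List Int) (stack : List Char)
    (hst : ∀ c ∈ stack, PySem.Chars.isdigit c = true)
    (hne : stack ≠ [] → cs ≠ []) :
    (PySem.List.enumerate cs j).foldl (pureStep L) (acc, stack) =
      (bScan acc (stack ++ cs), []) := by
  induction cs generalizing j acc stack with
  | nil =>
    have hs : stack = [] := by
      by_contra h; exact (hne h) rfl
    simp [PySem.List.enumerate, hs, bScan]
  | cons c rest ih =>
    rw [enum_cons, List.foldl_cons]
    by_cases hdig : PySem.Chars.isdigit c = true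
    · by_cases hlast : j = L - 1
      · have hrest : rest = [] := by
          have h0 : (rest.length : Int) = 0 := by simp at hj; omega
          exact List.eq_nil_of_length_eq_zero (by exact_mod_cast h0)
        subst hrest
        rw [show pureStep L (acc, stack) (j, c) = (acc ++ [pvInt (stack ++ [c])], []) by
          simp [pureStep, hdig, hlast]]
        rw [bScan_digits acc (stack ++ [c])
          (by intro x hx; rcases List.mem_append.mp hx with h | h
              · exact hst x h
              · simp at h; subst h; exact hdig)
          (by simp)]
        simp [PySem.List.enumerate]
      · have hstep : pureStep L (acc, stack) (j, c) = (acc, stack ++ [c]) := by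
          simp [pureStep, hdig, hlast]
        rw [hstep, ih (j + 1) (by simp at hj ⊢; omega) acc (stack ++ [c])
          (by intro x hx; rcases List.mem_append.mp hx with h | h
              · exact hst x h
              · simp at h; subst h; exact hdig)
          (by intro _ hr; subst hr; simp at hj; omega)]
        simp
    · have hdig' : PySem.Chars.isdigit c = false := by simpa using hdig
      have hstep : pureStep L (acc, stack) (j, c) =
          ((if stack.length > 0 then acc ++ [pvInt stack] else acc), []) := by
        simp [pureStep, hdig']
        split_ifs with h
        · rfl
        · simp [List.eq_nil_of_length_eq_zero (by omega : stack.length = 0)]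
      rw [hstep, ih (j + 1) (by simp at hj ⊢; omega) _ [] (by simp) (by simp),
        bScan_flush acc stack c rest hst hdig']
      simp

-- inserting a fresh key appends
lemma insert_fresh (k : Int) (v : List Int) (l : List (Int × List Int)) (hk : ∀ p ∈ l, p.1 ≠ k) :
    (PySem.Dict.mk l).insert k v = PySem.Dict.mk (l ++ [(k, v)]) := by
  rw [PySem.Dict.insert]
  have hc : (PySem.Dict.mk l).contains k = false := by
    rw [PySem.Dict.contains, List.any_eq_false]
    intro p hp
    simpa using hk p hp
  rw [hc]
  simp

lemma mem_enumerate_snd {α : Type} (q : Int × α) (xs : List α) (j : Int)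
    (h : q ∈ PySem.List.enumerate xs j) : q.2 ∈ xs := by
  induction xs generalizing j with
  | nil => simp [PySem.List.enumerate] at h
  | cons x t ih =>
    rw [enum_cons] at h
    rcases List.mem_cons.mp h with h | h
    · subst h; simp
    · simp [ih (j + 1) h]

-- the two top-level folds build the same association list, for any fresh starting dict
lemma outer (xs : List String) (j : Int) (l : List (Int × List Int))
    (hl : ∀ p ∈ l, p.1 < j) (hdom : ∀ s ∈ xs, pvDomStr s = true) :
    (PySem.List.enumerate xs j).foldl
      (fun d p =>
        ((PySem.List.enumerate p.2.toList).foldl (aStep p.1 (PySem.Str.len p.2))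
          (d.insert p.1 ([] : List Int), ([] : List Char))).1)
      (PySem.Dict.mk l) =
    (PySem.List.enumerate xs j).foldl
      (fun d p => d.insert p.1 (bScan [] p.2.toList))
      (PySem.Dict.mk l) := by
  induction xs generalizing j l with
  | nil => rfl
  | cons s t ih =>
    have hfresh : ∀ p ∈ l, p.1 ≠ j := fun p hp => by have := hl p hp; omega
    have hd : ∀ q ∈ PySem.List.enumerate s.toList 0,
        (PySem.Int.ofChars? [q.2]).isSome = PySem.Chars.isdigit q.2 := by
      intro q hq
      have hc : pvDomChar q.2 = true := by
        have := hdom s (by simp)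
        simp [pvDomStr, List.all_eq_true] at this
        exact this q.2 (mem_enumerate_snd q s.toList 0 hq)
      exact digit_test q.2 hc
    rw [enum_cons, List.foldl_cons, List.foldl_cons]
    have hA : ((PySem.List.enumerate s.toList 0).foldl (aStep j (PySem.Str.len s))
        ((PySem.Dict.mk l).insert j ([] : List Int), ([] : List Char))).1 =
        PySem.Dict.mk (l ++ [(j, bScan [] s.toList)]) := by
      rw [insert_fresh j [] l hfresh,
        inner_dict (PySem.List.enumerate s.toList 0) j (PySem.Str.len s) l hfresh [] [] hd,
        pure_eq_bScan s.toList 0 (PySem.Str.len s) (by simp [PySem.Str.len]) [] []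
          (by simp) (by simp)]
      simp
    rw [hA, insert_fresh j (bScan [] s.toList) l hfresh]
    exact ih (j + 1) (l ++ [(j, bScan [] s.toList)])
      (by intro p hp
          rcases List.mem_append.mp hp with h | h
          · have := hl p h; omega
          · have hp' := List.mem_singleton.mp h
            subst hp'
            simp)
      (fun s' hs' => hdom s' (by simp [hs']))

-- ===== VERDICT (by name: the statement is the Claim_ definition above) =====
theorem get_part_numbers_spec : Claim_equal_get_part_numbers := by
  intro xs hdom
  unfold Spec_get_part_numbers get_part_numbers get_part_numbers_alt
  have hd : ∀ s ∈ xs, pvDomStr s = true := by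
    simpa [Dom_get_part_numbers, List.all_eq_true] using hdom
  exact congrArg PySem.Dict.items (outer xs 0 [] (by simp) hd)
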